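-- pv_equiv track=rewrite | github.com/coral2742/Advent-Of-Code-2024 | Day_4/Day_4.py | count_diagonal_principal
-- ===== SOURCE A (Python) =====
-- def count_diagonal_principal(lines, word):
--     count = 0
--     rows = len(lines)
--     cols = len(lines[0])
--     word_length = len(word)
--
--     for start in range(rows + cols - 1):
--         diagonal = []
--         for row in range(rows):
--             col = start - row
--             if 0 <= col < cols:
--                 diagonal.append(lines[row][col])
--         diagonal_str = ''.join(diagonal)
--         count += diagonal_str.count(word)
--         count += diagonal_str[::-1].count(word)
--
--     return count
-- ===== SOURCE B (Python) =====
-- def _greedy(lines, r, s, dr, n, word):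
--     # non-overlapping occurrences of word read along anti-diagonal s (col = s - row),
--     # starting at row r, stepping rows by dr; greedy skip gives str.count semantics
--     k = len(word)
--     cnt = 0
--     i = 0
--     while i + k <= n:
--         if all(lines[r + dr * (i + j)][s - (r + dr * (i + j))] == word[j] for j in range(k)):
--             cnt += 1
--             i += k
--         else:
--             i += 1
--     return cnt
--
--
-- def count_diagonal_principal(lines, word):
--     rows = len(lines)
--     cols = len(lines[0])
--     k = len(word)
--     if k == 0:
--         # every diagonal of length L contributes 2*(L+1); total length = rows*cols
--         return 2 * (rows * cols + rows + cols - 1)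
--     total = 0
--     for s in range(rows + cols - 1):
--         r0 = max(0, s - cols + 1)
--         r1 = min(rows - 1, s)
--         n = r1 - r0 + 1
--         total += _greedy(lines, r0, s, 1, n, word)
--         total += _greedy(lines, r1, s, -1, n, word)
--     return total
-- ===== Notes on version B (the rewrite author's own statement) =====
-- stated objective: alternative
-- what changed: B never builds the diagonal strings A joins and counts: it matches the word directly in the grid along each anti-diagonal (downward and upward) with a greedy non-overlapping scan reproducing str.count semantics, and uses a closed form 2*(rows*cols + rows + cols - 1) for the empty word.
-- outside the precondition, e.g. on count_diagonal_principal([], 'x'): A raises IndexError, B raises IndexError; on count_diagonal_principal(['ab', 'a'], 'ab'): A raises IndexError, B returns 1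
import Mathlib
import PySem

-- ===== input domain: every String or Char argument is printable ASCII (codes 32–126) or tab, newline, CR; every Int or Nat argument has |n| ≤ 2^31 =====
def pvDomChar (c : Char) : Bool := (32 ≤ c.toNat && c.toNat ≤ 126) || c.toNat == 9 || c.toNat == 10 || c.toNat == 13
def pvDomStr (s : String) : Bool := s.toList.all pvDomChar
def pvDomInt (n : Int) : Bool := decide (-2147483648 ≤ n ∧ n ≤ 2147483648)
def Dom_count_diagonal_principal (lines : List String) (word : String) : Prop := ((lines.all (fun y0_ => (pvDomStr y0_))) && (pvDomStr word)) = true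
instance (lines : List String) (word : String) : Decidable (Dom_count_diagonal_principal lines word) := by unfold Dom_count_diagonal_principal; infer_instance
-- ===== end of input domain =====

-- B drops A's diagonal-string construction entirely: it matches the word directly in the
-- grid along each anti-diagonal with a greedy non-overlapping scan (str.count semantics),
-- and a closed form for the empty word (objective: alternative; same return value).

-- lines[row] as a list of code points (row is always in range on admitted inputs)
def pvLineOf (lines : List String) (row : Nat) : List Char :=
  ((PySem.List.pyGet? lines (row : Int)).getD "").toList

-- ===== PORT A =====
-- literal port of A; diagonal_str[::-1] is List.reverse;
-- lines[0] / lines[row][col] raise on empty/short rows — excluded by Pre_, the getD defaults are unreachable there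
def count_diagonal_principal (lines : List String) (word : String) : Int :=
  let rows := lines.length
  let cols := ((PySem.List.pyGet? lines 0).getD "").toList.length
  (List.range (rows + cols - 1)).foldl (fun count (start : Nat) =>
    let diagonal := (List.range rows).foldl (fun diag (row : Nat) =>
      let col : Int := (start : Int) - (row : Int)
      if 0 ≤ col ∧ col < (cols : Int) then
        diag ++ [(PySem.List.pyGet? (pvLineOf lines row) col).getD ' ']
      else diag) ([] : List Char)
    count + (PySem.Chars.count diagonal word.toList : Int)
          + (PySem.Chars.count diagonal.reverse word.toList : Int)) 0

-- ===== PORT B =====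
-- lines[row][col] for Int coordinates (in range wherever B reads, under Pre_)
def pvCharAt (lines : List String) (row col : Int) : Char :=
  (PySem.List.pyGet? ((PySem.List.pyGet? lines row).getD "").toList col).getD ' '

-- the while-loop of Source B's _greedy; fuel = n+1 bounds the iteration count (i grows each turn)
def pvGreedyGo (lines : List String) (r s dr : Int) (n : Int) (w : List Char) :
    Nat → Nat → Int → Int
  | 0, _, cnt => cnt
  | fuel+1, i, cnt =>
    if (i : Int) + w.length ≤ n then
      if (List.range w.length).all (fun j =>
          pvCharAt lines (r + dr * ((i + j : Nat) : Int))
                         (s - (r + dr * ((i + j : Nat) : Int))) == w.getD j ' ')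
      then pvGreedyGo lines r s dr n w fuel (i + w.length) (cnt + 1)
      else pvGreedyGo lines r s dr n w fuel (i + 1) cnt
    else cnt

def pvGreedy (lines : List String) (r s dr n : Int) (w : List Char) : Int :=
  pvGreedyGo lines r s dr n w (n.toNat + 1) 0 0

-- literal port of Source B
def count_diagonal_principal_alt (lines : List String) (word : String) : Int :=
  let rows := lines.length
  let cols := ((PySem.List.pyGet? lines 0).getD "").toList.length
  let k := word.toList.length
  if k = 0 then
    2 * ((rows : Int) * cols + rows + cols - 1)
  else
    (List.range (rows + cols - 1)).foldl (fun total (s : Nat) =>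
      let r0 : Int := max 0 ((s : Int) - cols + 1)
      let r1 : Int := min ((rows : Int) - 1) (s : Int)
      let n : Int := r1 - r0 + 1
      total + pvGreedy lines r0 s 1 n word.toList
            + pvGreedy lines r1 s (-1) n word.toList) 0

-- ===== PRECONDITION & SPEC =====
-- Pre_ excludes exactly the inputs on which A raises IndexError: empty `lines`
-- (lines[0]) and grids where some row is shorter than row 0 (lines[row][col]).
def Pre_count_diagonal_principal (lines : List String) (word : String) : Prop :=
  lines ≠ [] ∧ ∀ l ∈ lines, (lines.headD "").length ≤ l.length
instance (lines : List String) (word : String) : Decidable (Pre_count_diagonal_principal lines word) := by unfold Pre_count_diagonal_principal; infer_instance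

def pvWitness_count_diagonal_principal : List String × String := (["abc", "bca", "cab"], "ab")

def Spec_count_diagonal_principal (lines : List String) (word : String) (out : Int) : Prop := out = count_diagonal_principal_alt lines word
instance (lines : List String) (word : String) (out : Int) : Decidable (Spec_count_diagonal_principal lines word out) := by unfold Spec_count_diagonal_principal; infer_instance

-- ===== CLAIM (what is proved, stated in full; the proofs are below) =====
def Claim_equal_count_diagonal_principal : Prop := ∀ (lines : List String) (word : String), Dom_count_diagonal_principal lines word → Pre_count_diagonal_principal lines word → Spec_count_diagonal_principal lines word (count_diagonal_principal lines word)

-- ===== LEMMAS AND PROOFS =====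

-- reference function: Python's non-overlapping substring count (w ≠ [] meaningful case)
def pvCnt (w : List Char) : List Char → Nat
  | [] => 0
  | h :: t =>
    if w.isPrefixOf (h :: t) ∧ w ≠ [] then 1 + pvCnt w ((h :: t).drop w.length)
    else pvCnt w t
termination_by l => l.length
decreasing_by
  · rename_i hcond
    have : w.length ≠ 0 := by
      intro h0; exact hcond.2 (List.eq_nil_of_length_eq_zero h0)
    simp; omega
  · simp

-- the characters of diagonal `s` (rows < r), in increasing row order (A's diagonal list)
def pvDiag (lines : List String) (cols s r : Nat) : List Char :=
  ((List.range r).filter (fun row => decide (row ≤ s) && decide (s < row + cols))).map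
    (fun row => (pvLineOf lines row).getD (s - row) ' ')

-- A's inner loop over the rows computes pvDiag
lemma pvA_inner (lines : List String) (cols s : Nat) (r : Nat) :
    (List.range r).foldl (fun diag (row : Nat) =>
      let col : Int := (s : Int) - (row : Int)
      if 0 ≤ col ∧ col < (cols : Int) then
        diag ++ [(PySem.List.pyGet? (pvLineOf lines row) col).getD ' ']
      else diag) ([] : List Char) = pvDiag lines cols s r := by
  induction r with
  | zero => simp [pvDiag]
  | succ r ih =>
    rw [List.range_succ, List.foldl_append, List.foldl_cons, List.foldl_nil, ih]
    simp only [pvDiag, List.range_succ, List.filter_append, List.map_append,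
      List.filter_cons, List.filter_nil]
    by_cases h : r ≤ s ∧ s < r + cols
    · have hc : (0 : Int) ≤ (s : Int) - (r : Int) ∧ (s : Int) - (r : Int) < (cols : Int) := by
        omega
      have hcast : (s : Int) - (r : Int) = ((s - r : Nat) : Int) := by omega
      simp only [hcast, PySem.List.pyGet?_natCast]
      simp [h.1, h.2, List.getD]
      exact hc.2
    · have hc : ¬ ((0 : Int) ≤ (s : Int) - (r : Int) ∧ (s : Int) - (r : Int) < (cols : Int)) := by
        omega
      simp only [if_neg hc, decide_eq_true_eq, Bool.and_eq_true]
      rw [if_neg (by simpa using h)]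
      simp

-- Chars.count's worker computes pvCnt once the fuel covers the list
lemma pvCountGo_eq (w : List Char) (hw : w ≠ []) :
    ∀ fuel l acc, l.length ≤ fuel → PySem.Chars.count.go w fuel l acc = acc + pvCnt w l := by
  intro fuel
  induction fuel with
  | zero =>
    intro l acc hl
    have : l = [] := List.eq_nil_of_length_eq_zero (by omega)
    subst this; simp [pvCnt, PySem.Chars.count.go]
  | succ fuel ih =>
    intro l acc hl
    match l with
    | [] => simp [pvCnt, PySem.Chars.count.go]
    | h :: t =>
      show (if w.isPrefixOf (h::t) then PySem.Chars.count.go w fuel ((h::t).drop w.length) (acc+1)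
            else PySem.Chars.count.go w fuel t acc) = acc + pvCnt w (h :: t)
      by_cases hp : w.isPrefixOf (h :: t)
      · have hwlen : 1 ≤ w.length := by
          cases w with | nil => exact absurd rfl hw | cons a b => simp
        rw [if_pos hp, ih _ _ (by simp at hl ⊢; omega)]
        rw [pvCnt, if_pos ⟨hp, hw⟩]
        omega
      · rw [if_neg hp, ih _ _ (by simp at hl ⊢; omega)]
        rw [pvCnt, if_neg (fun hx => hp hx.1)]

lemma pvCount_eq_pvCnt (w l : List Char) (hw : w ≠ []) :
    PySem.Chars.count l w = pvCnt w l := by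
  have : w.isEmpty = false := by cases w with | nil => exact absurd rfl hw | cons a b => rfl
  show (if w.isEmpty then l.length + 1 else PySem.Chars.count.go w l.length l 0) = pvCnt w l
  rw [this]
  simpa using pvCountGo_eq w hw l.length l 0 le_rfl

lemma pvCnt_of_short (w l : List Char) (hl : l.length < w.length) : pvCnt w l = 0 := by
  induction l with
  | nil => simp [pvCnt]
  | cons h t ih =>
    rw [pvCnt]
    have hnp : ¬ w.isPrefixOf (h :: t) = true := by
      intro hp
      have := (List.isPrefixOf_iff_prefix.mp hp).length_le
      simp only [List.length_cons] at this hl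
      omega
    rw [if_neg (fun hx => hnp hx.1)]
    exact ih (by simp at hl ⊢; omega)

-- prefix test via elementwise comparison
lemma pvPrefix_iff (w D : List Char) (i : Nat) (hik : i + w.length ≤ D.length) :
    ((List.range w.length).all (fun j => D.getD (i + j) ' ' == w.getD j ' ')) = true
      ↔ w.isPrefixOf (D.drop i) := by
  rw [List.isPrefixOf_iff_prefix, List.prefix_iff_eq_take]
  constructor
  · intro h
    apply List.ext_getElem
    · simp; omega
    · intro j h1 h2
      have hj : j < w.length := h1
      have := (List.all_eq_true.mp h) j (List.mem_range.mpr hj)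
      simp only [beq_iff_eq] at this
      have hD : (D.drop i).take w.length = ((D.drop i).take w.length) := rfl
      rw [List.getElem_take, List.getElem_drop]
      have hgd : D.getD (i + j) ' ' = D[i + j] := List.getD_eq_getElem D ' ' (by omega)
      have hgw : w.getD j ' ' = w[j] := List.getD_eq_getElem w ' ' hj
      rw [hgd, hgw] at this
      exact this.symm
  · intro h
    apply List.all_eq_true.mpr
    intro j hj
    have hj' : j < w.length := List.mem_range.mp hj
    simp only [beq_iff_eq]
    rw [List.getD_eq_getElem D ' ' (by omega), List.getD_eq_getElem w ' ' hj']
    have : w[j] = ((D.drop i).take w.length)[j]'(by simp; omega) := by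
      congr 1
    rw [this, List.getElem_take, List.getElem_drop]

-- the greedy worker counts pvCnt of the remaining suffix, for any access function
-- that agrees with list D along the diagonal
lemma pvGreedyGo_eq (lines : List String) (r s dr : Int) (w D : List Char) (hw : w ≠ [])
    (hacc : ∀ t, t < D.length →
      pvCharAt lines (r + dr * (t : Int)) (s - (r + dr * (t : Int))) = D.getD t ' ') :
    ∀ fuel i cnt, D.length + 1 ≤ fuel + i →
      pvGreedyGo lines r s dr (D.length : Int) w fuel i cnt = cnt + pvCnt w (D.drop i) := by
  intro fuel
  induction fuel with
  | zero =>
    intro i cnt h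
    rw [List.drop_eq_nil_of_le (by omega)]
    simp [pvGreedyGo, pvCnt]
  | succ fuel ih =>
    intro i cnt h
    show (if (i : Int) + w.length ≤ (D.length : Int) then
        if (List.range w.length).all (fun j =>
            pvCharAt lines (r + dr * ((i + j : Nat) : Int))
                           (s - (r + dr * ((i + j : Nat) : Int))) == w.getD j ' ')
        then pvGreedyGo lines r s dr (D.length : Int) w fuel (i + w.length) (cnt + 1)
        else pvGreedyGo lines r s dr (D.length : Int) w fuel (i + 1) cnt
      else cnt) = cnt + pvCnt w (D.drop i)
    have hw1 : 1 ≤ w.length := by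
      cases w with | nil => exact absurd rfl hw | cons a b => simp
    by_cases hle : i + w.length ≤ D.length
    · rw [if_pos (by omega)]
      have hallEq : ((List.range w.length).all (fun j =>
            pvCharAt lines (r + dr * ((i + j : Nat) : Int))
                           (s - (r + dr * ((i + j : Nat) : Int))) == w.getD j ' '))
          = ((List.range w.length).all (fun j => D.getD (i + j) ' ' == w.getD j ' ')) := by
        rw [Bool.eq_iff_iff]
        simp only [List.all_eq_true, List.mem_range]
        constructor <;> intro hall j hj <;>
          [rw [← hacc (i + j) (by omega)]; rw [hacc (i + j) (by omega)]] <;> exact hall j hj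
      rw [hallEq]
      have hlen_drop : (D.drop i).length = D.length - i := by simp
      obtain ⟨hc, tc, hD⟩ : ∃ hc tc, D.drop i = hc :: tc := by
        cases hDd : D.drop i with
        | nil => exfalso; have := congrArg List.length hDd; simp at this; omega
        | cons a b => exact ⟨a, b, rfl⟩
      by_cases hm : ((List.range w.length).all (fun j => D.getD (i + j) ' ' == w.getD j ' ')) = true
      · rw [if_pos hm]
        have hpref : w.isPrefixOf (D.drop i) := (pvPrefix_iff w D i hle).mp hm
        rw [ih (i + w.length) (cnt + 1) (by omega)]
        have hstep : pvCnt w (D.drop i) = 1 + pvCnt w (D.drop (i + w.length)) := by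
          rw [hD, pvCnt, if_pos ⟨hD ▸ hpref, hw⟩, ← hD, List.drop_drop]
        rw [hstep]; push_cast; ring
      · rw [if_neg hm]
        have hnpref : ¬ w.isPrefixOf (D.drop i) = true := fun hx => hm ((pvPrefix_iff w D i hle).mpr hx)
        rw [ih (i + 1) cnt (by omega)]
        have hstep : pvCnt w (D.drop i) = pvCnt w (D.drop (i + 1)) := by
          rw [hD, pvCnt, if_neg (fun hx => hnpref (hD ▸ hx.1))]
          have : tc = D.drop (i + 1) := by
            have := @List.tail_drop _ D i
            rw [hD] at this; simpa using this
          rw [this]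
        rw [hstep]
    · rw [if_neg (by omega)]
      rw [pvCnt_of_short w (D.drop i) (by simp; omega)]
      simp

-- a contiguous filter of range is a range'
lemma pvFilterRange (s cols m : Nat) :
    (List.range m).filter (fun row => decide (row ≤ s) && decide (s < row + cols))
      = List.range' (s + 1 - cols) (min (s + 1) m - (s + 1 - cols)) := by
  induction m with
  | zero => simp
  | succ m ih =>
    rw [List.range_succ, List.filter_append, ih]
    simp only [List.filter_cons, List.filter_nil]
    by_cases h : m ≤ s ∧ s < m + cols
    · have h1 : min (s + 1) (m + 1) - (s + 1 - cols) = (min (s + 1) m - (s + 1 - cols)) + 1 := by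
        omega
      have h2 : (s + 1 - cols) + 1 * (min (s + 1) m - (s + 1 - cols)) = m := by omega
      rw [h1, List.range'_concat, h2]
      simp [h.1, h.2]
    · have h1 : min (s + 1) (m + 1) - (s + 1 - cols) = min (s + 1) m - (s + 1 - cols) := by omega
      rw [h1]
      have : (decide (m ≤ s) && decide (s < m + cols)) = false := by
        simp only [Bool.and_eq_false_iff, decide_eq_false_iff_not]
        omega
      simp [this]

lemma pvDiag_eq (lines : List String) (cols s r : Nat) :
    pvDiag lines cols s r = (List.range' (s + 1 - cols) (min (s + 1) r - (s + 1 - cols))).map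
      (fun row => (pvLineOf lines row).getD (s - row) ' ') := by
  rw [pvDiag, pvFilterRange]

lemma pvDiag_length (lines : List String) (cols s r : Nat) :
    (pvDiag lines cols s r).length = min (s + 1) r - (s + 1 - cols) := by
  rw [pvDiag_eq]; simp

lemma pvCharAt_natCast (lines : List String) (row col : Nat) :
    pvCharAt lines (row : Int) (col : Int) = (pvLineOf lines row).getD col ' ' := by
  simp [pvCharAt, pvLineOf, PySem.List.pyGet?_natCast, List.getD]

lemma pvDiag_getD (lines : List String) (cols s r t : Nat)
    (ht : t < min (s + 1) r - (s + 1 - cols)) :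
    (pvDiag lines cols s r).getD t ' '
      = (pvLineOf lines (s + 1 - cols + t)).getD (s - (s + 1 - cols + t)) ' ' := by
  rw [pvDiag_eq, List.getD_eq_getElem _ _ (by simpa using ht)]
  simp

-- B's downward greedy scan of diagonal s computes pvCnt of A's diagonal string
lemma pvGreedy_down (lines : List String) (w : List Char) (hw : w ≠ []) (cols s : Nat)
    (h1 : 1 ≤ lines.length) (hs : s < lines.length + cols - 1) :
    pvGreedy lines (max 0 ((s : Int) - cols + 1)) s 1
        ((min ((lines.length : Int) - 1) s) - (max 0 ((s : Int) - cols + 1)) + 1) w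
      = pvCnt w (pvDiag lines cols s lines.length) := by
  have hlen := pvDiag_length lines cols s lines.length
  have hr0 : max 0 ((s : Int) - cols + 1) = ((s + 1 - cols : Nat) : Int) := by omega
  have hn : (min ((lines.length : Int) - 1) s) - (max 0 ((s : Int) - cols + 1)) + 1
      = (((pvDiag lines cols s lines.length).length : Nat) : Int) := by rw [hlen]; omega
  rw [hn, hr0, pvGreedy, Int.toNat_natCast]
  rw [pvGreedyGo_eq lines _ s 1 w (pvDiag lines cols s lines.length) hw ?_ _ 0 0 (by omega)]
  · simp
  · intro t ht
    have hts : s + 1 - cols + t ≤ s := by omega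
    have e1 : ((s + 1 - cols : Nat) : Int) + 1 * (t : Int) = ((s + 1 - cols + t : Nat) : Int) := by
      push_cast; ring
    have e2 : (s : Int) - ((s + 1 - cols + t : Nat) : Int)
        = ((s - (s + 1 - cols + t) : Nat) : Int) := by omega
    rw [e1, e2, pvCharAt_natCast, pvDiag_getD lines cols s lines.length t (by omega)]

-- B's upward greedy scan computes pvCnt of the reversed diagonal string
lemma pvGreedy_up (lines : List String) (w : List Char) (hw : w ≠ []) (cols s : Nat)
    (h1 : 1 ≤ lines.length) (hs : s < lines.length + cols - 1) :
    pvGreedy lines (min ((lines.length : Int) - 1) s) s (-1)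
        ((min ((lines.length : Int) - 1) s) - (max 0 ((s : Int) - cols + 1)) + 1) w
      = pvCnt w (pvDiag lines cols s lines.length).reverse := by
  have hlen := pvDiag_length lines cols s lines.length
  have hn : (min ((lines.length : Int) - 1) s) - (max 0 ((s : Int) - cols + 1)) + 1
      = (((pvDiag lines cols s lines.length).reverse.length : Nat) : Int) := by
    rw [List.length_reverse, hlen]; omega
  rw [hn, pvGreedy, Int.toNat_natCast]
  rw [pvGreedyGo_eq lines _ s (-1) w (pvDiag lines cols s lines.length).reverse hw ?_ _ 0 0
      (by omega)]
  · simp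
  · intro t ht
    rw [List.length_reverse, hlen] at ht
    have e1 : min ((lines.length : Int) - 1) s + (-1) * (t : Int)
        = ((min (lines.length - 1) s - t : Nat) : Int) := by omega
    have e2 : (s : Int) - ((min (lines.length - 1) s - t : Nat) : Int)
        = ((s - (min (lines.length - 1) s - t) : Nat) : Int) := by omega
    rw [e1, e2, pvCharAt_natCast]
    have hrl : (pvDiag lines cols s lines.length).reverse.getD t ' '
        = (pvDiag lines cols s lines.length).getD
            (min (s + 1) lines.length - (s + 1 - cols) - 1 - t) ' ' := by
      rw [List.getD_eq_getElem _ _ (by simp [hlen]; omega), List.getElem_reverse,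
        List.getD_eq_getElem _ _ (by simp [hlen]; omega)]
      congr 1
      omega
    rw [hrl, pvDiag_getD lines cols s lines.length _ (by omega)]
    congr 2 <;> omega

-- counting the empty word: Python's str.count('') is len + 1
lemma pvCount_nil (l : List Char) : PySem.Chars.count l [] = l.length + 1 := rfl

-- total length of all diagonals is the number of grid cells
lemma pvSumDiag (rows cols : Nat) (h1 : 1 ≤ rows) :
    ∑ s ∈ Finset.range (rows + cols - 1), (min (s + 1) rows - (s + 1 - cols)) = rows * cols := by
  have step1 : ∀ s, min (s + 1) rows - (s + 1 - cols)
      = ∑ r ∈ Finset.range rows, (if s + 1 - cols ≤ r ∧ r ≤ s then (1 : Nat) else 0) := by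
    intro s
    rw [Finset.sum_boole]
    have : {r ∈ Finset.range rows | s + 1 - cols ≤ r ∧ r ≤ s}
        = Finset.Ico (s + 1 - cols) (min (s + 1) rows) := by
      ext r
      simp only [Finset.mem_filter, Finset.mem_range, Finset.mem_Ico]
      omega
    rw [this, Nat.card_Ico]
    simp
  rw [Finset.sum_congr rfl (fun s _ => step1 s), Finset.sum_comm]
  have step2 : ∀ r ∈ Finset.range rows,
      (∑ s ∈ Finset.range (rows + cols - 1),
        (if s + 1 - cols ≤ r ∧ r ≤ s then (1 : Nat) else 0)) = cols := by
    intro r hr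
    rw [Finset.sum_boole]
    have hrr : r < rows := Finset.mem_range.mp hr
    have : {s ∈ Finset.range (rows + cols - 1) | s + 1 - cols ≤ r ∧ r ≤ s}
        = Finset.Ico r (r + cols) := by
      ext s
      simp only [Finset.mem_filter, Finset.mem_range, Finset.mem_Ico]
      omega
    rw [this, Nat.card_Ico]
    simp
  rw [Finset.sum_congr rfl step2, Finset.sum_const, Finset.card_range, smul_eq_mul]

-- ===== VERDICT (by name: the statement is the Claim_ definition above) =====
theorem count_diagonal_principal_spec : Claim_equal_count_diagonal_principal := by
  intro lines word _hdom hpre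
  unfold Spec_count_diagonal_principal count_diagonal_principal count_diagonal_principal_alt
  have h1 : 1 ≤ lines.length := by
    cases lines with
    | nil => exact absurd rfl hpre.1
    | cons a b => simp
  simp only [pvA_inner]
  by_cases hw : word.toList = []
  · rw [if_pos (by rw [hw]; rfl), hw]
    simp only [pvCount_nil, List.length_reverse, pvDiag_length]
    generalize hc : ((PySem.List.pyGet? lines 0).getD "").toList.length = cols
    generalize hr : lines.length = rows
    rw [hr] at h1
    rw [PySem.List.foldl_congr_mem _ _
      (fun acc (s : Nat) => acc + (((min (s + 1) rows - (s + 1 - cols) + 1 : Nat) : Int)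
        + ((min (s + 1) rows - (s + 1 - cols) + 1 : Nat) : Int))) 0
      (fun acc x _ => by ring)]
    rw [PySem.List.foldl_add]
    have hlist : (List.map (fun (s : Nat) => (((min (s + 1) rows - (s + 1 - cols) + 1 : Nat) : Int)
          + ((min (s + 1) rows - (s + 1 - cols) + 1 : Nat) : Int)))
          (List.range (rows + cols - 1))).sum
        = ∑ s ∈ Finset.range (rows + cols - 1),
            (((min (s + 1) rows - (s + 1 - cols) + 1 : Nat) : Int)
              + ((min (s + 1) rows - (s + 1 - cols) + 1 : Nat) : Int)) := rfl
    have hnat : (∑ s ∈ Finset.range (rows + cols - 1),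
          ((min (s + 1) rows - (s + 1 - cols) + 1) + (min (s + 1) rows - (s + 1 - cols) + 1)))
        = 2 * (rows * cols) + 2 * (rows + cols - 1) := by
      simp only [Finset.sum_add_distrib, Finset.sum_const, Finset.card_range, smul_eq_mul,
        pvSumDiag rows cols h1]
      omega
    have hcast : (∑ s ∈ Finset.range (rows + cols - 1),
          (((min (s + 1) rows - (s + 1 - cols) + 1 : Nat) : Int)
            + ((min (s + 1) rows - (s + 1 - cols) + 1 : Nat) : Int)))
        = ((2 * (rows * cols) + 2 * (rows + cols - 1) : Nat) : Int) := by
      rw [← hnat]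
      push_cast
      rfl
    rw [hlist, hcast]
    have hfin : ((2 * (rows * cols) + 2 * (rows + cols - 1) : Nat) : Int)
        = 2 * ((rows : Int) * cols + rows + cols - 1) := by
      push_cast [Nat.cast_sub (show 1 ≤ rows + cols by omega)]
      ring
    rw [hfin]
    ring
  · rw [if_neg (by simpa using hw)]
    apply PySem.List.foldl_congr_mem
    intro acc s hs
    have hs' : s < lines.length + ((PySem.List.pyGet? lines 0).getD "").toList.length - 1 :=
      List.mem_range.mp hs
    rw [pvCount_eq_pvCnt _ _ hw, pvCount_eq_pvCnt _ _ hw,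
      pvGreedy_down lines word.toList hw _ s h1 hs',
      pvGreedy_up lines word.toList hw _ s h1 hs']
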